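-- pv_equiv track=rewrite | github.com/Design0r/advent-of-code | 2023/Python/src/day_01.py | check_for_word_num
-- ===== SOURCE A (Python) =====
-- from typing import Optional
--
-- alpha_num = {
--     "one": 1,
--     "two": 2,
--     "three": 3,
--     "four": 4,
--     "five": 5,
--     "six": 6,
--     "seven": 7,
--     "eight": 8,
--     "nine": 9,
-- }
--
-- def check_for_word_num(line: str, index: int) -> Optional[int]:
--     for k, _ in alpha_num.items():
--         num_len = len(k)
--         input_chars = "".join(
--             [i for idx, i in enumerate(line) if index <= idx <= index + num_len - 1]
--         )
--
--         if input_chars in alpha_num: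
--             return alpha_num[input_chars]
--
--     return
-- ===== SOURCE B (Python) =====
-- alpha_num = {
--     "one": 1,
--     "two": 2,
--     "three": 3,
--     "four": 4,
--     "five": 5,
--     "six": 6,
--     "seven": 7,
--     "eight": 8,
--     "nine": 9,
-- }
--
-- # The nine digit words only have lengths 3, 4 and 5, and none is a prefix of
-- # another, so it suffices to slice the (at most three) candidate substrings
-- # directly -- one slice per length -- and look each up in the dictionary.
-- def check_for_word_num(line, index):
--     for length in (3, 4, 5):
--         num = alpha_num.get(line[index:index + length])
--         if num is not None:
--             return num
--     return None
-- ===== Notes on version B (the rewrite author's own statement) =====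
-- stated objective: faster
-- what changed: A rebuilds a candidate substring by scanning the entire line with enumerate/filter/join once per dictionary word (nine full passes); B slices the line directly once per distinct word length (3, 4, 5) and looks each slice up with dict.get, relying on the digit words being prefix-free so lookup order across lengths cannot matter. Pre_ excludes negative indices, which are outside the natural domain of checking a word at a position: A's whole-line filter accidentally clamps the window start to 0 there, while B's direct slices follow Python's negative-index convention.
-- outside the precondition, e.g. on check_for_word_num('one', -2): A returns 1, B returns None
import Mathlib
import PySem

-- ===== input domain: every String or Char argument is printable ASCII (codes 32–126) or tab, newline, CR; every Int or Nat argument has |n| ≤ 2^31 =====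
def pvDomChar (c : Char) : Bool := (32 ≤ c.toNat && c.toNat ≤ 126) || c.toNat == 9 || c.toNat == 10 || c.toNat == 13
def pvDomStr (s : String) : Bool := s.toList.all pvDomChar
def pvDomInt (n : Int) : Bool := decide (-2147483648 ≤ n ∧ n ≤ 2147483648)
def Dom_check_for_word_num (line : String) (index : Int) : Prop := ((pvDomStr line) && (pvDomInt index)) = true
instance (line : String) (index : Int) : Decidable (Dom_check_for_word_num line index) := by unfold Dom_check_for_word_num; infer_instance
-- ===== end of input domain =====

-- B replaces A's nine whole-line enumerate-filter-join scans by at most three direct slices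
-- (one per distinct word length), looked up with dict.get; objective: faster.

-- the module constant alpha_num (shared context of both programs)
def pvAlphaNum : PySem.Dict String Int :=
  PySem.Dict.ofList [("one", 1), ("two", 2), ("three", 3), ("four", 4), ("five", 5),
                     ("six", 6), ("seven", 7), ("eight", 8), ("nine", 9)]

-- ===== PORT A =====
-- the 'for k, _ in alpha_num.items()' loop
def pvChkA (line : String) (index : Int) : List (String × Int) → Option Int
  | [] => none
  | (k, _) :: rest =>
    let numLen : Int := PySem.Str.len k
    let inputChars : String := String.ofList
      (((PySem.List.enumerate line.toList 0).filter
          (fun p => decide (index ≤ p.1) && decide (p.1 ≤ index + numLen - 1))).map (·.2))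
    if pvAlphaNum.contains inputChars then pvAlphaNum.get? inputChars
    else pvChkA line index rest

def check_for_word_num (line : String) (index : Int) : Option Int :=
  pvChkA line index pvAlphaNum.items

-- ===== PORT B =====
-- the 'for length in (3, 4, 5)' loop of Source B
def pvChkB (line : String) (index : Int) : List Int → Option Int
  | [] => none
  | L :: rest =>
    match pvAlphaNum.get? (PySem.Str.slice line (some index) (some (index + L))) with
    | some num => some num
    | none => pvChkB line index rest

def check_for_word_num_alt (line : String) (index : Int) : Option Int :=
  pvChkB line index [3, 4, 5]

-- ===== PRECONDITION & SPEC =====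
-- Pre_ excludes negative indices, which lie outside the natural domain of checking a word at a
-- position: A's whole-line filter accidentally clamps the window start to 0 there, while B's
-- direct slices follow Python's negative-index convention.
def Pre_check_for_word_num (line : String) (index : Int) : Prop := 0 ≤ index
instance (line : String) (index : Int) : Decidable (Pre_check_for_word_num line index) := by unfold Pre_check_for_word_num; infer_instance

def pvWitness_check_for_word_num : String × Int := ("xoneight", 1)

def Spec_check_for_word_num (line : String) (index : Int) (out : Option Int) : Prop := out = check_for_word_num_alt line index
instance (line : String) (index : Int) (out : Option Int) : Decidable (Spec_check_for_word_num line index out) := by unfold Spec_check_for_word_num; infer_instance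

-- ===== CLAIM (what is proved, stated in full; the proofs are below) =====
def Claim_equal_check_for_word_num : Prop := ∀ (line : String) (index : Int), Dom_check_for_word_num line index → Pre_check_for_word_num line index → Spec_check_for_word_num line index (check_for_word_num line index)

-- ===== LEMMAS AND PROOFS =====

-- the candidate substring of length L starting at index, as a list of chars
def pvWord (line : String) (index L : Int) : List Char :=
  (line.toList.drop index.toNat).take ((index + L).toNat - index.toNat)

def pvG (line : String) (index L : Int) : Option Int :=
  pvAlphaNum.get? (String.ofList (pvWord line index L))

-- A's enumerate-filter-join equals a take-after-drop window
theorem pv_enum_filter (cs : List Char) (s0 lo hi : Int) :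
    ((PySem.List.enumerate cs s0).filter
        (fun p => decide (lo ≤ p.1) && decide (p.1 ≤ hi))).map (·.2)
      = (cs.take (hi - s0 + 1).toNat).drop (lo - s0).toNat := by
  induction cs generalizing s0 with
  | nil => simp [PySem.List.enumerate_nil]
  | cons c cs ih =>
    rw [PySem.List.enumerate_cons]
    by_cases hhi : s0 ≤ hi
    · have h1 : (hi - s0 + 1).toNat = (hi - (s0 + 1) + 1).toNat + 1 := by omega
      rw [h1]
      by_cases hlo : lo ≤ s0
      · have h2 : (lo - s0).toNat = 0 := by omega
        have h3 : (lo - (s0 + 1)).toNat = 0 := by omega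
        simp [hlo, hhi, h2, ih (s0 + 1), h3]
      · have h2 : (lo - s0).toNat = (lo - (s0 + 1)).toNat + 1 := by omega
        simp [hlo, ih (s0 + 1), h2]
    · have h1 : (hi - s0 + 1).toNat = 0 := by omega
      have h2 : (hi - (s0 + 1) + 1).toNat = 0 := by omega
      simp [hhi, ih (s0 + 1), h1, h2]

-- one step of A's loop, rewritten to the canonical window (needs 0 ≤ index so that A's
-- filter window drop (index - 0).toNat really starts at index)
theorem pv_stepA (line : String) (index : Int) (h : 0 ≤ index) (k : String) (v : Int) (rest : List (String × Int)) :
    pvChkA line index ((k, v) :: rest)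
      = match pvG line index (PySem.Str.len k) with
        | some num => some num
        | none => pvChkA line index rest := by
  simp only [pvChkA, PySem.Dict.contains_eq_isSome_get?]
  rw [pv_enum_filter]
  have e1 : index + PySem.Str.len k - 1 - 0 + 1 = index + PySem.Str.len k := by ring
  have e2 : index - 0 = index := by ring
  rw [e1, e2, List.drop_take]
  unfold pvG pvWord
  cases hx : pvAlphaNum.get? (String.ofList ((line.toList.drop index.toNat).take ((index + PySem.Str.len k).toNat - index.toNat))) <;> simp_all

theorem pv_get_cases (u : List Char) (x : Int) (h : pvAlphaNum.get? (String.ofList u) = some x) :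
    (u, x) ∈ [("one".toList, (1:Int)), ("two".toList, 2), ("three".toList, 3), ("four".toList, 4),
      ("five".toList, 5), ("six".toList, 6), ("seven".toList, 7), ("eight".toList, 8), ("nine".toList, 9)] := by
  have e : pvAlphaNum = PySem.Dict.mk [("one", 1), ("two", 2), ("three", 3), ("four", 4), ("five", 5),
                     ("six", 6), ("seven", 7), ("eight", 8), ("nine", 9)] := by decide
  rw [e] at h
  simp only [PySem.Dict.get?_mk_cons, beq_iff_eq] at h
  split_ifs at h with h1 h2 h3 h4 h5 h6 h7 h8 h9 <;>
    [skip; skip; skip; skip; skip; skip; skip; skip; skip; cases h] <;>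
    injection h with h' <;> subst h' <;>
    [ (have : u = "one".toList := by simpa using congrArg String.toList h1.symm);
      (have : u = "two".toList := by simpa using congrArg String.toList h2.symm);
      (have : u = "three".toList := by simpa using congrArg String.toList h3.symm);
      (have : u = "four".toList := by simpa using congrArg String.toList h4.symm);
      (have : u = "five".toList := by simpa using congrArg String.toList h5.symm);
      (have : u = "six".toList := by simpa using congrArg String.toList h6.symm);
      (have : u = "seven".toList := by simpa using congrArg String.toList h7.symm);
      (have : u = "eight".toList := by simpa using congrArg String.toList h8.symm);
      (have : u = "nine".toList := by simpa using congrArg String.toList h9.symm)] <;>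
    subst this <;> simp

-- keys of pvAlphaNum are prefix-free: two hits on nested windows agree
theorem pv_prefix_free (u v : List Char) (x y : Int) (hp : u <+: v)
    (hu : pvAlphaNum.get? (String.ofList u) = some x)
    (hv : pvAlphaNum.get? (String.ofList v) = some y) : x = y := by
  have cu := pv_get_cases u x hu
  have cv := pv_get_cases v y hv
  simp only [List.mem_cons, List.not_mem_nil, or_false, Prod.mk.injEq] at cu cv
  rcases cu with ⟨rfl, rfl⟩|⟨rfl, rfl⟩|⟨rfl, rfl⟩|⟨rfl, rfl⟩|⟨rfl, rfl⟩|⟨rfl, rfl⟩|⟨rfl, rfl⟩|⟨rfl, rfl⟩|⟨rfl, rfl⟩ <;>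
    rcases cv with ⟨rfl, rfl⟩|⟨rfl, rfl⟩|⟨rfl, rfl⟩|⟨rfl, rfl⟩|⟨rfl, rfl⟩|⟨rfl, rfl⟩|⟨rfl, rfl⟩|⟨rfl, rfl⟩|⟨rfl, rfl⟩ <;>
    first | rfl | exact absurd hp (by decide)

theorem pv_word_prefix (line : String) (index L L' : Int) (h : L ≤ L') :
    pvWord line index L <+: pvWord line index L' := by
  unfold pvWord
  exact List.take_prefix_take_left (by omega)

-- B's slice equals the canonical window (needs 0 ≤ index, 0 ≤ L)
theorem pv_sliceB (line : String) (index L : Int) (h : 0 ≤ index) (hL : 0 ≤ L) :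
    pvAlphaNum.get? (PySem.Str.slice line (some index) (some (index + L)))
      = pvG line index L := by
  unfold pvG pvWord
  simp only [PySem.Str.slice]
  rw [show PySem.Chars.slice line.toList (some index) (some (index + L))
        = (line.toList.drop index.toNat).take ((index + L).toNat - index.toNat)
      from PySem.List.slice_toNat _ h (by omega)]

theorem check_for_word_num_spec : Claim_equal_check_for_word_num := by
  intro line index _ hpre
  unfold Spec_check_for_word_num
  have h : (0:Int) ≤ index := hpre
  have hitems : pvAlphaNum.items = [("one", 1), ("two", 2), ("three", 3), ("four", 4), ("five", 5),
                     ("six", 6), ("seven", 7), ("eight", 8), ("nine", 9)] := by decide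
  have l1 : PySem.Str.len "one" = 3 := by decide
  have l2 : PySem.Str.len "two" = 3 := by decide
  have l3 : PySem.Str.len "three" = 5 := by decide
  have l4 : PySem.Str.len "four" = 4 := by decide
  have l5 : PySem.Str.len "five" = 4 := by decide
  have l6 : PySem.Str.len "six" = 3 := by decide
  have l7 : PySem.Str.len "seven" = 5 := by decide
  have l8 : PySem.Str.len "eight" = 5 := by decide
  have l9 : PySem.Str.len "nine" = 4 := by decide
  rw [check_for_word_num, check_for_word_num_alt, hitems]
  rw [pv_stepA line index h, pv_stepA line index h, pv_stepA line index h, pv_stepA line index h,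
      pv_stepA line index h, pv_stepA line index h, pv_stepA line index h, pv_stepA line index h,
      pv_stepA line index h,
      l1, l2, l3, l4, l5, l6, l7, l8, l9]
  rw [pvChkB, pvChkB, pvChkB,
      pv_sliceB line index 3 h (by omega), pv_sliceB line index 4 h (by omega),
      pv_sliceB line index 5 h (by omega)]
  simp only [pvChkA, pvChkB]
  cases h3 : pvG line index 3 with
  | some v => rfl
  | none =>
    cases h4 : pvG line index 4 with
    | none => cases h5 : pvG line index 5 <;> rfl
    | some v4 =>
      cases h5 : pvG line index 5 with
      | none => rfl
      | some v5 =>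
        exact congrArg some (pv_prefix_free _ _ _ _ (pv_word_prefix line index 4 5 (by omega)) h4 h5).symm
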